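-- pv_equiv track=rewrite | github.com/treyrem/Scientific-classification-problem | old_code/standalone_improved_classifier.py | _find_best_domain_match
-- ===== SOURCE A (Python) =====
-- from typing import Dict, List, Tuple, Optional, Any, Set
--
-- def _find_best_domain_match(target: str, valid_domains: List[str]) -> str:
--     """Find best matching domain from valid options"""
--     if not target:
--         return "Other"
--
--     target_lower = target.lower()
--
--     # Exact match
--     for domain in valid_domains:
--         if target_lower == domain.lower():
--             return domain
--
--     # Substring match
--     for domain in valid_domains:
--         if target_lower in domain.lower() or domain.lower() in target_lower:
--             return domain
--
--     return "Other"
-- ===== SOURCE B (Python) =====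
-- def _find_best_domain_match(target, valid_domains):
--     """Single pass: return immediately on exact match; remember the first
--     substring match and fall back to it (or 'Other') after the scan."""
--     if not target:
--         return "Other"
--     target_lower = target.lower()
--     candidate = None
--     for domain in valid_domains:
--         domain_lower = domain.lower()
--         if target_lower == domain_lower:
--             return domain
--         if candidate is None and (target_lower in domain_lower or domain_lower in target_lower):
--             candidate = domain
--     return candidate if candidate is not None else "Other"
-- ===== Notes on version B (the rewrite author's own statement) =====
-- stated objective: alternative
-- what changed: Replaces A's two sequential scans (each lowercasing every domain) with a single pass that lowercases each domain once, returns on an exact match, and carries the first substring candidate in a variable for the fallback.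
import Mathlib
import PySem

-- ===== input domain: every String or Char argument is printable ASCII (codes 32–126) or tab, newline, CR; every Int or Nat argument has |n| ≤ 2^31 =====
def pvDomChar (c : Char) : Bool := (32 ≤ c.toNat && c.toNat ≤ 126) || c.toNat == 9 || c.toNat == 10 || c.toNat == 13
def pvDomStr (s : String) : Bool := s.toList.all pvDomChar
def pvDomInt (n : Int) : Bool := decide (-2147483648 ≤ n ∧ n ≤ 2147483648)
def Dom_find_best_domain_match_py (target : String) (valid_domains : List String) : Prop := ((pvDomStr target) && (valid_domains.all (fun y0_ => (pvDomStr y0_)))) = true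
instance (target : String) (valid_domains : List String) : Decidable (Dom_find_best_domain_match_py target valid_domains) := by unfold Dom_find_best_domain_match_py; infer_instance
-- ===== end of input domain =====

-- B does one pass over valid_domains (lowercasing each once), returning on an exact match and
-- remembering the first substring candidate, instead of A's two sequential scans.

-- ===== PORT A =====
def find_best_domain_match_py (target : String) (valid_domains : List String) : String :=
  if target = "" then "Other"
  else
    let target_lower := PySem.Str.lower target
    -- exact match loop (for-with-early-return)
    match valid_domains.find? (fun domain => target_lower == PySem.Str.lower domain) with
    | some domain => domain
    | none =>
      -- substring match loop
      match valid_domains.find? (fun domain =>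
          PySem.Str.isIn target_lower (PySem.Str.lower domain) ||
          PySem.Str.isIn (PySem.Str.lower domain) target_lower) with
      | some domain => domain
      | none => "Other"

-- ===== PORT B =====
def find_best_domain_match_py_altLoop (target_lower : String) : List String → Option String → String
  | [], candidate => candidate.getD "Other"
  | domain :: rest, candidate =>
    let domain_lower := PySem.Str.lower domain
    if target_lower == domain_lower then domain
    else
      let candidate' :=
        if candidate.isNone &&
           (PySem.Str.isIn target_lower domain_lower || PySem.Str.isIn domain_lower target_lower)
        then some domain else candidate
      find_best_domain_match_py_altLoop target_lower rest candidate'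

def find_best_domain_match_py_alt (target : String) (valid_domains : List String) : String :=
  if target = "" then "Other"
  else find_best_domain_match_py_altLoop (PySem.Str.lower target) valid_domains none

-- ===== PRECONDITION & SPEC =====
def Spec_find_best_domain_match_py (target : String) (valid_domains : List String) (out : String) : Prop := out = find_best_domain_match_py_alt target valid_domains
instance (target : String) (valid_domains : List String) (out : String) : Decidable (Spec_find_best_domain_match_py target valid_domains out) := by unfold Spec_find_best_domain_match_py; infer_instance

-- ===== CLAIM (what is proved, stated in full; the proofs are below) =====
def Claim_equal_find_best_domain_match_py : Prop := ∀ (target : String) (valid_domains : List String), Dom_find_best_domain_match_py target valid_domains → Spec_find_best_domain_match_py target valid_domains (find_best_domain_match_py target valid_domains)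

-- ===== LEMMAS AND PROOFS =====

-- The single-pass loop equals: first exact match if any, else the carried candidate, else the
-- first substring match, else "Other".
theorem altLoop_eq (tl : String) (xs : List String) (cand : Option String) :
    find_best_domain_match_py_altLoop tl xs cand =
      match xs.find? (fun d => tl == PySem.Str.lower d) with
      | some d => d
      | none =>
        match cand with
        | some c => c
        | none =>
          match xs.find? (fun d =>
              PySem.Str.isIn tl (PySem.Str.lower d) ||
              PySem.Str.isIn (PySem.Str.lower d) tl) with
          | some d => d
          | none => "Other" := by
  induction xs generalizing cand with
  | nil => cases cand <;> simp [find_best_domain_match_py_altLoop, Option.getD]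
  | cons d rest ih =>
    simp only [find_best_domain_match_py_altLoop, List.find?]
    by_cases hx : tl == PySem.Str.lower d
    · simp [hx]
    · simp only [hx, Bool.false_eq_true, if_false]
      cases cand with
      | some c =>
        simp only [Option.isNone, Bool.false_and, Bool.false_eq_true, if_false]
        rw [ih]
      | none =>
        by_cases hs : (PySem.Str.isIn tl (PySem.Str.lower d) ||
            PySem.Str.isIn (PySem.Str.lower d) tl) = true
        · simp only [Option.isNone, Bool.true_and, hs, if_true]
          rw [ih]
        · simp only [Option.isNone, Bool.true_and, hs]
          rw [ih]
          simp only [Bool.false_eq_true, if_false]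

-- ===== VERDICT (by name: the statement is the Claim_ definition above) =====
theorem find_best_domain_match_py_spec : Claim_equal_find_best_domain_match_py := by
  intro target valid_domains _
  unfold Spec_find_best_domain_match_py find_best_domain_match_py find_best_domain_match_py_alt
  by_cases h : target = ""
  · simp [h]
  · simp only [h, if_false]
    rw [altLoop_eq]
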